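-- pv_equiv track=rewrite | github.com/ppabba101/annotation-agent | backend/src/ml/rnn_inference.py | sanitize_text
-- ===== SOURCE A (Python) =====
-- _VALID_CHARS = set(
--     '\x00 !"#\'(),-.'
--     "0123456789:;?"
--     "ABCDEFGHIJKLMNOPRSTUVWY"
--     "abcdefghijklmnopqrstuvwxyz"
-- )
--
-- _CASE_MAP = {"Q": "q", "X": "x", "Z": "z"}
--
-- def sanitize_text(text: str) -> str:
--     """Sanitize text for the RNN model's character set."""
--     result = []
--     for ch in text:
--         if ch in _CASE_MAP:
--             result.append(_CASE_MAP[ch])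
--         elif ch in _VALID_CHARS:
--             result.append(ch)
--         # else: silently drop unsupported characters
--     return "".join(result)
-- ===== SOURCE B (Python) =====
-- _VALID_CHARS = set(
--     '\x00 !"#\'(),-.'
--     "0123456789:;?"
--     "ABCDEFGHIJKLMNOPRSTUVWY"
--     "abcdefghijklmnopqrstuvwxyz"
-- )
--
-- _CASE_MAP = {"Q": "q", "X": "x", "Z": "z"}
--
-- _ALLOWED = _VALID_CHARS | set(_CASE_MAP)
-- _TRANS = str.maketrans(_CASE_MAP)
--
-- def sanitize_text(text: str) -> str:
--     """Filter to the allowed character set, then remap Q/X/Z via a translation table."""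
--     cleaned = "".join(ch for ch in text if ch in _ALLOWED)
--     return cleaned.translate(_TRANS)
-- ===== Notes on version B (the rewrite author's own statement) =====
-- stated objective: idiomatic
-- what changed: Replaces A's single branch-per-char append loop with a two-pass filter-then-remap decomposition: first keep only characters in ALLOWED = _VALID_CHARS | set(_CASE_MAP), then apply a precomputed str.translate table mapping Q/X/Z to lowercase.
import Mathlib
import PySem

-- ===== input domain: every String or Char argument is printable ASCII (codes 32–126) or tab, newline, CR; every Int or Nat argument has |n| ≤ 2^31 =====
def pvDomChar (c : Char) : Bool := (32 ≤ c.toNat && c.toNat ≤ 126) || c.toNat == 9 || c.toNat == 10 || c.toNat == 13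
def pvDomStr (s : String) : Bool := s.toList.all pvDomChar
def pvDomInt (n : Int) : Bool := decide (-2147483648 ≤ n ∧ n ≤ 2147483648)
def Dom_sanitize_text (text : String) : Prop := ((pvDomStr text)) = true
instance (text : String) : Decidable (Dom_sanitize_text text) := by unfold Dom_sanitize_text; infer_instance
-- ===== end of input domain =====

set_option maxRecDepth 10000


-- B filters to the allowed set and then remaps Q/X/Z via a translation map (two passes),
-- instead of A's single branch-per-char append loop; objective: idiomatic, same cost.

-- ===== PORT A =====
-- _VALID_CHARS = set('\x00 !"#\'(),-.' "0123456789:;?" "ABCDEFGHIJKLMNOPRSTUVWY" "abcdefghijklmnopqrstuvwxyz")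
def pvValidChars : PySem.Set Char :=
  PySem.Set.ofList ("\x00 !\"#'(),-.0123456789:;?ABCDEFGHIJKLMNOPRSTUVWYabcdefghijklmnopqrstuvwxyz".toList)

-- _CASE_MAP = {"Q": "q", "X": "x", "Z": "z"}
def pvCaseMap : PySem.Dict Char Char := PySem.Dict.ofList [('Q', 'q'), ('X', 'x'), ('Z', 'z')]

def sanitize_text (text : String) : String :=
  String.ofList (text.toList.foldl (fun result ch =>
    match pvCaseMap.get? ch with
    | some v => result ++ [v]                                   -- if ch in _CASE_MAP: append(_CASE_MAP[ch])
    | none =>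
      if pvValidChars.contains ch then result ++ [ch]           -- elif ch in _VALID_CHARS: append(ch)
      else result) [])                                          -- else drop

-- ===== PORT B =====
-- _ALLOWED = _VALID_CHARS | set(_CASE_MAP)
def pvAllowed : PySem.Set Char := PySem.Set.union pvValidChars (pvCaseMap.keys)

def sanitize_text_alt (text : String) : String :=
  let cleaned := text.toList.filter (fun ch => pvAllowed.contains ch)
  String.ofList (cleaned.map (fun ch => pvCaseMap.getD ch ch))      -- cleaned.translate(_TRANS)

-- ===== PRECONDITION & SPEC =====
def Spec_sanitize_text (text : String) (out : String) : Prop := out = sanitize_text_alt text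
instance (text : String) (out : String) : Decidable (Spec_sanitize_text text out) := by unfold Spec_sanitize_text; infer_instance

-- ===== CLAIM (what is proved, stated in full; the proofs are below) =====
def Claim_equal_sanitize_text : Prop := ∀ (text : String), Dom_sanitize_text text → Spec_sanitize_text text (sanitize_text text)

-- ===== LEMMAS AND PROOFS =====

-- per-character agreement of A's branch with B's filter-then-translate
lemma pv_step_eq (res : List Char) (c : Char) :
    (match pvCaseMap.get? c with
     | some v => res ++ [v]
     | none => if pvValidChars.contains c then res ++ [c] else res)
    = res ++ (if pvAllowed.contains c then [pvCaseMap.getD c c] else []) := by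
  by_cases hq : c = 'Q'
  · subst hq
    rw [show pvCaseMap.get? 'Q' = some 'q' by decide]
    rw [show (if pvAllowed.contains 'Q' = true then [pvCaseMap.getD 'Q' 'Q'] else []) = ['q'] by decide]
  by_cases hx : c = 'X'
  · subst hx
    rw [show pvCaseMap.get? 'X' = some 'x' by decide]
    rw [show (if pvAllowed.contains 'X' = true then [pvCaseMap.getD 'X' 'X'] else []) = ['x'] by decide]
  by_cases hz : c = 'Z'
  · subst hz
    rw [show pvCaseMap.get? 'Z' = some 'z' by decide]
    rw [show (if pvAllowed.contains 'Z' = true then [pvCaseMap.getD 'Z' 'Z'] else []) = ['z'] by decide]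
  have h1 : ('Q' == c) = false := beq_eq_false_iff_ne.mpr (fun h => hq h.symm)
  have h2 : ('X' == c) = false := beq_eq_false_iff_ne.mpr (fun h => hx h.symm)
  have h3 : ('Z' == c) = false := beq_eq_false_iff_ne.mpr (fun h => hz h.symm)
  have hmk : pvCaseMap = PySem.Dict.mk [('Q', 'q'), ('X', 'x'), ('Z', 'z')] := by decide
  have hget : pvCaseMap.get? c = none := by
    simp [hmk, PySem.Dict.get?, h1, h2, h3]
  have he : pvAllowed = pvValidChars ++ ['Q', 'X', 'Z'] := by decide
  have hallow : pvAllowed.contains c = pvValidChars.contains c := by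
    rw [he]; simp [PySem.Set.contains, List.mem_append, hq, hx, hz]
  have hgd : pvCaseMap.getD c c = c := by
    simp [PySem.Dict.getD, hget]
  rw [hget, hallow, hgd]
  split_ifs <;> simp

lemma pv_fold_eq (l : List Char) (acc : List Char) :
    l.foldl (fun result ch =>
      match pvCaseMap.get? ch with
      | some v => result ++ [v]
      | none => if pvValidChars.contains ch then result ++ [ch] else result) acc
    = acc ++ (l.filter (fun ch => pvAllowed.contains ch)).map (fun ch => pvCaseMap.getD ch ch) := by
  induction l generalizing acc with
  | nil => simp
  | cons c cs ih =>
    simp only [List.foldl_cons, List.filter_cons]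
    rw [pv_step_eq, ih]
    by_cases h : c ∈ pvAllowed <;> simp [h, PySem.Set.contains]

-- ===== VERDICT (by name: the statement is the Claim_ definition above) =====
theorem sanitize_text_spec : Claim_equal_sanitize_text := by
  intro text _
  unfold Spec_sanitize_text sanitize_text sanitize_text_alt
  rw [pv_fold_eq]
  simp
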